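-- pv_equiv track=rewrite | github.com/Sierraki/Solutions | 力扣&Leetcode/算法&algorithm/题库/3694.删除子字符串后不同的终点.py | distinctPoints
-- ===== SOURCE A (Python) =====
-- def distinctPoints(s: str, k: int) -> int:
--     n = len(s)
--     res1 = [0] * (n + 1)
--     res2 = [0] * (n + 1)
--     for i in range(n):
--         if s[i] == "L":
--             res1[i] = -1
--         elif s[i] == "R":
--             res1[i] = 1
--         elif s[i] == "U":
--             res2[i] = 1
--         else:
--             res2[i] = -1
--     p1 = [0]
--     p2 = [0]
--     ss = 0
--     for i in res1:
--         ss += i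
--         p1.append(ss)
--     ss = 0
--     for i in res2:
--         ss += i
--         p2.append(ss)
--     ans = set()
--     for i in range(n):
--         cur = s[i : i + k]
--         if len(cur) == k:
--             x = p1[-1] - (p1[i + k] - p1[i])
--             y = p2[-1] - (p2[i + k] - p2[i])
--             ans.add(f"{x}{'/'}{y}")
--     return len(ans)
-- ===== SOURCE B (Python) =====
-- def _delta(c):
--     if c == "L":
--         return (-1, 0)
--     if c == "R":
--         return (1, 0)
--     if c == "U":
--         return (0, 1)
--     return (0, -1)
--
--
-- def distinctPoints(s: str, k: int) -> int:
--     n = len(s)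
--     if k < 0 or k > n or n == 0:
--         return 0
--     tx = ty = 0
--     for c in s:
--         dx, dy = _delta(c)
--         tx += dx
--         ty += dy
--     wx = wy = 0
--     for c in s[:k]:
--         dx, dy = _delta(c)
--         wx += dx
--         wy += dy
--     ends = set()
--     for i in range(n - k + 1):
--         ends.add(f"{tx - wx}/{ty - wy}")
--         if i + k < n:
--             ax, ay = _delta(s[i + k])
--             rx, ry = _delta(s[i])
--             wx += ax - rx
--             wy += ay - ry
--     return len(ends)
-- ===== Notes on version B (the rewrite author's own statement) =====
-- stated objective: faster
-- what changed: Replaced the O(k) substring slice per start index and the prefix-sum arrays with a single O(n) sliding window: totals and the first window are summed once, then each shift subtracts the leaving char's delta and adds the entering one, with an index bound check instead of slicing.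
import Mathlib
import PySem

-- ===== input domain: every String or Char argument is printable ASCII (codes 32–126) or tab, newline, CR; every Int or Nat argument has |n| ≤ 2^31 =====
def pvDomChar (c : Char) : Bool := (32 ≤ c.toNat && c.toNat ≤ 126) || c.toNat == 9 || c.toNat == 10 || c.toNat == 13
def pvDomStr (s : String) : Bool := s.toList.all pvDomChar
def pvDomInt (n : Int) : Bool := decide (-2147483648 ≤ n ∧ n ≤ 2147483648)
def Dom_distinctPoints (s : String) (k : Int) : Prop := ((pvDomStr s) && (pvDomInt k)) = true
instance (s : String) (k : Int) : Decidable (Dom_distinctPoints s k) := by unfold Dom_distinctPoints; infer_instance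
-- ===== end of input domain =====

-- B replaces A's prefix-sum arrays and O(k) slice per start index by one O(n) sliding window
-- (subtract the leaving char's delta, add the entering one) with an index bound check; same return value.

-- ===== PORT A =====
def distinctPoints (s : String) (k : Int) : Int :=
  let cs := s.toList
  let n : Int := (cs.length : Int)
  -- res1/res2 built by index assignment over range(n)
  let rs := (PySem.List.pyRange 0 n).foldl
      (fun (r : List Int × List Int) i =>
        let c := PySem.List.pyGetD cs i ' '
        if c == 'L' then (PySem.List.pySetD r.1 i (-1), r.2)
        else if c == 'R' then (PySem.List.pySetD r.1 i 1, r.2)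
        else if c == 'U' then (r.1, PySem.List.pySetD r.2 i 1)
        else (r.1, PySem.List.pySetD r.2 i (-1)))
      (List.replicate (cs.length + 1) 0, List.replicate (cs.length + 1) 0)
  -- p1/p2: running-sum append loops
  let q1 := rs.1.foldl (fun (st : List Int × Int) v => (st.1 ++ [st.2 + v], st.2 + v)) ([0], 0)
  let q2 := rs.2.foldl (fun (st : List Int × Int) v => (st.1 ++ [st.2 + v], st.2 + v)) ([0], 0)
  let p1 := q1.1
  let p2 := q2.1
  let ans := (PySem.List.pyRange 0 n).foldl
      (fun (a : PySem.Set (List Char)) i =>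
        let cur := PySem.List.slice cs (some i) (some (i + k))
        if ((cur.length : Int) == k) then
          let x := PySem.List.pyGetD p1 (-1) 0 - (PySem.List.pyGetD p1 (i + k) 0 - PySem.List.pyGetD p1 i 0)
          let y := PySem.List.pyGetD p2 (-1) 0 - (PySem.List.pyGetD p2 (i + k) 0 - PySem.List.pyGetD p2 i 0)
          PySem.Set.add a (PySem.Int.toChars x ++ '/' :: PySem.Int.toChars y)
        else a)
      PySem.Set.empty
  PySem.Set.len ans

-- ===== PORT B =====
def pvDelta (c : Char) : Int × Int :=
  if c == 'L' then (-1, 0)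
  else if c == 'R' then (1, 0)
  else if c == 'U' then (0, 1)
  else (0, -1)

def distinctPoints_alt (s : String) (k : Int) : Int :=
  let cs := s.toList
  let n : Int := (cs.length : Int)
  if k < 0 || n < k || n == 0 then 0 else
    let t := cs.foldl (fun (t : Int × Int) c => (t.1 + (pvDelta c).1, t.2 + (pvDelta c).2)) (0, 0)
    let w0 := (PySem.List.slice cs none (some k)).foldl
        (fun (w : Int × Int) c => (w.1 + (pvDelta c).1, w.2 + (pvDelta c).2)) (0, 0)
    let fin := (PySem.List.pyRange 0 (n - k + 1)).foldl
        (fun (st : (Int × Int) × PySem.Set (List Char)) i =>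
          let w := st.1
          let e := PySem.Set.add st.2
              (PySem.Int.toChars (t.1 - w.1) ++ '/' :: PySem.Int.toChars (t.2 - w.2))
          if i + k < n then
            let a := pvDelta (PySem.List.pyGetD cs (i + k) ' ')
            let r := pvDelta (PySem.List.pyGetD cs i ' ')
            ((w.1 + a.1 - r.1, w.2 + a.2 - r.2), e)
          else (w, e))
        (w0, PySem.Set.empty)
    PySem.Set.len fin.2

-- ===== PRECONDITION & SPEC =====
def Spec_distinctPoints (s : String) (k : Int) (out : Int) : Prop := out = distinctPoints_alt s k
instance (s : String) (k : Int) (out : Int) : Decidable (Spec_distinctPoints s k out) := by unfold Spec_distinctPoints; infer_instance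

-- ===== CLAIM (what is proved, stated in full; the proofs are below) =====
def Claim_equal_distinctPoints : Prop := ∀ (s : String) (k : Int), Dom_distinctPoints s k → Spec_distinctPoints s k (distinctPoints s k)

-- ===== LEMMAS AND PROOFS =====

-- x- and y-components of a char's step, window sums, and the set key both programs build.
def pvDx (c : Char) : Int := (pvDelta c).1
def pvDy (c : Char) : Int := (pvDelta c).2
def pvSumX (l : List Char) : Int := (l.map pvDx).sum
def pvSumY (l : List Char) : Int := (l.map pvDy).sum
def pvKey (cs : List Char) (K : Nat) (i : Nat) : List Char :=
  PySem.Int.toChars (pvSumX cs - pvSumX ((cs.drop i).take K)) ++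
    '/' :: PySem.Int.toChars (pvSumY cs - pvSumY ((cs.drop i).take K))

-- running-sum list (the tail of Python's p1/p2)
def pvScan : List Int → Int → List Int
  | [], _ => []
  | v :: vs, ss => (ss + v) :: pvScan vs (ss + v)

-- L1: a guarded Set.add fold is the add-fold of the filtered, mapped list
theorem pv_foldl_ite_add {α β : Type} [BEq α] (l : List β) (c : β → Bool) (g : β → α)
    (a : PySem.Set α) :
    l.foldl (fun a i => if c i then PySem.Set.add a (g i) else a) a
      = ((l.filter c).map g).foldl PySem.Set.add a := by
  induction l generalizing a with
  | nil => rfl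
  | cons x xs ih =>
      by_cases h : c x = true
      · simp [h, ih]
      · simp only [Bool.not_eq_true] at h
        simp [h, ih]

-- L2: the pair-sum fold of B's first two loops
theorem pv_foldl_delta (l : List Char) (t : Int × Int) :
    l.foldl (fun t c => (t.1 + (pvDelta c).1, t.2 + (pvDelta c).2)) t
      = (t.1 + pvSumX l, t.2 + pvSumY l) := by
  induction l generalizing t with
  | nil => simp [pvSumX, pvSumY]
  | cons x xs ih =>
      simp [List.foldl_cons, ih, pvSumX, pvSumY, pvDx, pvDy]
      exact ⟨by ring, by ring⟩

-- L3: A's running-sum append loop produces pvScan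
theorem pv_foldl_scan (l : List Int) (p : List Int) (ss : Int) :
    l.foldl (fun (st : List Int × Int) v => (st.1 ++ [st.2 + v], st.2 + v)) (p, ss)
      = (p ++ pvScan l ss, ss + l.sum) := by
  induction l generalizing p ss with
  | nil => simp [pvScan]
  | cons v vs ih => simp [List.foldl_cons, ih, pvScan, add_assoc]

-- L4: indexing the scan list gives prefix sums
theorem pv_scan_getD (l : List Int) (ss : Int) (j : Nat) (h : j ≤ l.length) :
    (ss :: pvScan l ss).getD j 0 = ss + (l.take j).sum := by
  induction l generalizing ss j with
  | nil => simp at h; simp [h, pvScan]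
  | cons v vs ih =>
      cases j with
      | zero => simp
      | succ j =>
          simp only [pvScan, List.getD_cons_succ]
          rw [ih (ss + v) j (by simpa using h)]
          simp [add_assoc]

theorem pv_scan_length (l : List Int) (ss : Int) : (pvScan l ss).length = l.length := by
  induction l generalizing ss with
  | nil => rfl
  | cons v vs ih => simp [pvScan, ih]

theorem pv_take_succ_map (cs : List Char) (m : Nat) (f : Char → Int) (h : m < cs.length) :
    (cs.take (m + 1)).map f = (cs.take m).map f ++ [f cs[m]] := by
  have h2 : m < (cs.map f).length := by simpa using h
  rw [List.map_take, List.take_add_one, List.getElem?_eq_getElem h2]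
  simp

theorem pv_repl_succ (n m : Nat) (h : m ≤ n) :
    List.replicate (n + 1 - m) (0 : Int) = 0 :: List.replicate (n - m) 0 := by
  rw [show n + 1 - m = (n - m) + 1 by omega]
  rfl

-- L5: A's index-assignment loop fills map pvDx / map pvDy (with the trailing zero untouched)
theorem pv_fill (cs : List Char) (m : Nat) (hm : m ≤ cs.length) :
    (List.range m).foldl
      (fun (r : List Int × List Int) i =>
        let c := cs.getD i ' '
        if c == 'L' then (r.1.set i (-1), r.2)
        else if c == 'R' then (r.1.set i 1, r.2)
        else if c == 'U' then (r.1, r.2.set i 1)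
        else (r.1, r.2.set i (-1)))
      (List.replicate (cs.length + 1) 0, List.replicate (cs.length + 1) 0)
      = ((cs.take m).map pvDx ++ List.replicate (cs.length + 1 - m) 0,
         (cs.take m).map pvDy ++ List.replicate (cs.length + 1 - m) 0) := by
  induction m with
  | zero => simp
  | succ m ih =>
      have hmlt : m < cs.length := hm
      rw [List.range_succ, List.foldl_append, ih (Nat.le_of_lt hmlt)]
      simp only [List.foldl_cons, List.foldl_nil]
      have hget : cs.getD m ' ' = cs[m] := List.getD_eq_getElem cs ' ' hmlt
      have hset : ∀ f : Char → Int, ∀ v : Int, v = f cs[m] →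
          ((cs.take m).map f ++ List.replicate (cs.length + 1 - m) 0).set m v
            = (cs.take (m + 1)).map f ++ List.replicate (cs.length - m) 0 := by
        intro f v hv
        rw [pv_take_succ_map cs m f hmlt, pv_repl_succ cs.length m (Nat.le_of_lt hmlt)]
        rw [List.set_append]
        simp [Nat.le_of_lt hmlt, hv]
      have hskip : ∀ f : Char → Int, f cs[m] = 0 →
          (cs.take m).map f ++ List.replicate (cs.length + 1 - m) 0
            = (cs.take (m + 1)).map f ++ List.replicate (cs.length - m) 0 := by
        intro f hv
        rw [pv_take_succ_map cs m f hmlt, pv_repl_succ cs.length m (Nat.le_of_lt hmlt)]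
        simp [hv]
      rw [hget, show cs.length + 1 - (m + 1) = cs.length - m by omega]
      by_cases hL : cs[m] = 'L'
      · simp only [hL]
        simp only [show ('L' == 'L') = true from rfl, if_true]
        exact Prod.ext (hset pvDx (-1) (by simp [pvDx, pvDelta, hL]))
          (hskip pvDy (by simp [pvDy, pvDelta, hL]))
      · by_cases hR : cs[m] = 'R'
        · simp only [hR]
          simp only [show ('R' == 'L') = false from rfl, show ('R' == 'R') = true from rfl,
            Bool.false_eq_true, if_false, if_true]
          exact Prod.ext (hset pvDx 1 (by simp [pvDx, pvDelta, hR]))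
            (hskip pvDy (by simp [pvDy, pvDelta, hR]))
        · by_cases hU : cs[m] = 'U'
          · simp only [hU]
            simp only [show ('U' == 'L') = false from rfl, show ('U' == 'R') = false from rfl,
              show ('U' == 'U') = true from rfl, Bool.false_eq_true, if_false, if_true]
            exact Prod.ext (hskip pvDx (by simp [pvDx, pvDelta, hU]))
              (hset pvDy 1 (by simp [pvDy, pvDelta, hU]))
          · have h1 : (cs[m] == 'L') = false := by simp [hL]
            have h2 : (cs[m] == 'R') = false := by simp [hR]
            have h3 : (cs[m] == 'U') = false := by simp [hU]
            simp only [h1, h2, h3, Bool.false_eq_true, if_false]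
            exact Prod.ext (hskip pvDx (by simp [pvDx, pvDelta, hL, hR, hU]))
              (hset pvDy (-1) (by simp [pvDy, pvDelta, hL, hR, hU]))

theorem pv_slide_f (f : Char → Int) (cs : List Char) (K i : Nat) (h : i + K < cs.length) :
    (((cs.drop (i + 1)).take K).map f).sum
      = (((cs.drop i).take K).map f).sum + f (cs.getD (i + K) ' ') - f (cs.getD i ' ') := by
  cases K with
  | zero => simp
  | succ K =>
      have hi : i < cs.length := by omega
      rw [List.getD_eq_getElem cs ' ' hi, List.getD_eq_getElem cs ' ' h]
      have hd1 : cs.drop i = cs[i] :: cs.drop (i + 1) := by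
        rw [List.drop_eq_getElem_cons hi]
      rw [hd1, List.take_succ_cons]
      have hK : K < (cs.drop (i + 1)).length := by
        rw [List.length_drop]; omega
      rw [List.take_add_one, List.getElem?_eq_getElem hK]
      have hgd : (cs.drop (i + 1))[K] = cs[i + (K + 1)] := by
        rw [List.getElem_drop]
        congr 1
        omega
      simp [hgd]
      ring

-- L6: sliding-window step
theorem pv_slide (cs : List Char) (K i : Nat) (h : i + K < cs.length) :
    pvSumX ((cs.drop (i + 1)).take K)
        = pvSumX ((cs.drop i).take K) + pvDx (cs.getD (i + K) ' ') - pvDx (cs.getD i ' ')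
      ∧ pvSumY ((cs.drop (i + 1)).take K)
        = pvSumY ((cs.drop i).take K) + pvDy (cs.getD (i + K) ' ') - pvDy (cs.getD i ' ') := by
  exact ⟨pv_slide_f pvDx cs K i h, pv_slide_f pvDy cs K i h⟩

theorem pv_ofList_snoc {α : Type} [BEq α] (xs : List α) (x : α) :
    PySem.Set.ofList (xs ++ [x]) = PySem.Set.add (PySem.Set.ofList xs) x := by
  simp [PySem.Set.ofList, List.foldl_append]

-- the invariant of B's sliding-window loop
theorem pv_B_loop (cs : List Char) (K : Nat) (hK : K ≤ cs.length) (tx ty wx wy : Int)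
    (htx : tx = pvSumX cs) (hty : ty = pvSumY cs)
    (hwx : wx = pvSumX (cs.take K)) (hwy : wy = pvSumY (cs.take K))
    (m : Nat) (hm : m ≤ cs.length - K) :
    (List.range m).foldl
      (fun (st : (Int × Int) × PySem.Set (List Char)) (i : Nat) =>
        if (i : Int) + (K : Int) < (cs.length : Int) then
          ((st.1.1 + (pvDelta (PySem.List.pyGetD cs ((i : Int) + (K : Int)) ' ')).1
              - (pvDelta (PySem.List.pyGetD cs (i : Int) ' ')).1,
            st.1.2 + (pvDelta (PySem.List.pyGetD cs ((i : Int) + (K : Int)) ' ')).2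
              - (pvDelta (PySem.List.pyGetD cs (i : Int) ' ')).2),
           st.2.add (PySem.Int.toChars (tx - st.1.1) ++ '/' :: PySem.Int.toChars (ty - st.1.2)))
        else (st.1, st.2.add (PySem.Int.toChars (tx - st.1.1) ++ '/' :: PySem.Int.toChars (ty - st.1.2))))
      ((wx, wy), PySem.Set.empty)
    = ((pvSumX ((cs.drop m).take K), pvSumY ((cs.drop m).take K)),
       PySem.Set.ofList ((List.range m).map (pvKey cs K))) := by
  induction m with
  | zero => simp [hwx, hwy, PySem.Set.ofList, PySem.Set.empty]
  | succ m ih =>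
      rw [List.range_succ, List.foldl_append, ih (by omega)]
      simp only [List.foldl_cons, List.foldl_nil]
      have hcond : ((m : Int) + (K : Int) < (cs.length : Int)) := by
        have : m + K < cs.length := by omega
        exact_mod_cast this
      rw [if_pos hcond]
      have hcast : (m : Int) + (K : Int) = ((m + K : Nat) : Int) := by push_cast; ring
      rw [hcast, PySem.List.pyGetD_natCast, PySem.List.pyGetD_natCast]
      have hslide := pv_slide cs K m (by omega)
      rw [hslide.1, hslide.2]
      subst htx hty
      simp [List.map_append, pv_ofList_snoc, pvDx, pvDy, pvKey]

-- L7: characterization of port B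
theorem pv_B_char (s : String) (k : Int) (h0 : 0 ≤ k) (h1 : k ≤ (s.toList.length : Int))
    (h2 : s.toList ≠ []) :
    distinctPoints_alt s k
      = PySem.Set.len (PySem.Set.ofList
          ((List.range (s.toList.length - k.toNat + 1)).map (pvKey s.toList k.toNat))) := by
  have hlen : 0 < s.toList.length := List.length_pos_of_ne_nil h2
  obtain ⟨K, hk⟩ : ∃ K : Nat, k = (K : Int) := ⟨k.toNat, (Int.toNat_of_nonneg h0).symm⟩
  subst hk
  have hKN : K ≤ s.toList.length := by exact_mod_cast h1
  unfold distinctPoints_alt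
  rw [if_neg (by
    intro hcontra
    simp only [Bool.or_eq_true, decide_eq_true_eq, beq_iff_eq] at hcontra
    omega)]
  simp only [pv_foldl_delta, PySem.List.slice_to_natCast, zero_add, Int.toNat_natCast]
  rw [show ((s.toList.length : Int) - (K : Int) + 1)
        = ((s.toList.length - K + 1 : Nat) : Int) by omega]
  rw [PySem.List.pyRange_zero_natCast]
  simp only [List.foldl_map]
  rw [List.range_succ, List.foldl_append]
  rw [pv_B_loop s.toList K hKN _ _ _ _ rfl rfl rfl rfl (s.toList.length - K) le_rfl]
  simp only [List.foldl_cons, List.foldl_nil]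
  rw [if_neg (by push_cast [Nat.cast_sub hKN]; omega)]
  simp [pv_ofList_snoc, pvKey]

theorem pv_pyGetD_neg_one {α : Type} (xs : List α) (d : α) (h : xs ≠ []) :
    PySem.List.pyGetD xs (-1) d = xs.getD (xs.length - 1) d := by
  have hl : 0 < xs.length := List.length_pos_of_ne_nil h
  have h1 : ¬ ((0 : Int) ≤ -1) := by omega
  have h2 : -(xs.length : Int) ≤ -1 := by omega
  simp only [PySem.List.pyGetD, PySem.List.pyGet?, PySem.List.pyIdx?, if_neg h1, if_pos h2]
  simp [List.getD]

-- prefix-sum reading of A's p1/p2 differences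
theorem pv_prefix_f (f : Char → Int) (cs : List Char) (i K : Nat) (h : i + K ≤ cs.length) :
    PySem.List.pyGetD (0 :: pvScan (cs.map f ++ [0]) 0) (-1) 0
      - (PySem.List.pyGetD (0 :: pvScan (cs.map f ++ [0]) 0) ((i : Int) + (K : Int)) 0
         - (0 :: pvScan (cs.map f ++ [0]) 0).getD i 0)
    = (cs.map f).sum - (((cs.drop i).take K).map f).sum := by
  rw [show (i : Int) + (K : Int) = ((i + K : Nat) : Int) by push_cast; ring,
    PySem.List.pyGetD_natCast]
  have hlenl : (cs.map f ++ [0]).length = cs.length + 1 := by simp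
  have hgd : ∀ j, j ≤ cs.length → (0 :: pvScan (cs.map f ++ [0]) 0).getD j 0
      = ((cs.take j).map f).sum := by
    intro j hj
    rw [pv_scan_getD _ 0 j (by rw [hlenl]; omega), zero_add]
    rw [List.take_append_of_le_length (by simp; omega), ← List.map_take]
  have hlast : PySem.List.pyGetD (0 :: pvScan (cs.map f ++ [0]) 0) (-1) 0
      = (cs.map f).sum := by
    rw [pv_pyGetD_neg_one _ _ (by simp)]
    have hlc : (0 :: pvScan (cs.map f ++ [0]) 0).length = cs.length + 2 := by
      simp [pv_scan_length]
    rw [hlc, show cs.length + 2 - 1 = cs.length + 1 by omega]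
    rw [pv_scan_getD _ 0 (cs.length + 1) (by rw [hlenl])]
    rw [List.take_of_length_le (by rw [hlenl])]
    simp
  rw [hlast, hgd (i + K) h, hgd i (by omega)]
  rw [List.take_add, List.map_append, List.sum_append]
  ring

-- A's slice-length guard is the bound check
theorem pv_cond (cs : List Char) (k : Int) (i : Nat) (hi : i < cs.length) :
    (((PySem.List.slice cs (some (i : Int)) (some ((i : Int) + k))).length : Int) == k)
      = decide (0 ≤ k ∧ (i : Int) + k ≤ (cs.length : Int)) := by
  rw [Bool.eq_iff_iff]
  simp only [beq_iff_eq, decide_eq_true_eq]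
  by_cases hk : 0 ≤ k
  · obtain ⟨K, hkk⟩ : ∃ K : Nat, k = (K : Int) := ⟨k.toNat, (Int.toNat_of_nonneg hk).symm⟩
    subst hkk
    rw [show (i : Int) + (K : Int) = ((i + K : Nat) : Int) by push_cast; ring]
    rw [PySem.List.length_slice, PySem.List.clampIdx_natCast, PySem.List.clampIdx_natCast]
    omega
  · rw [PySem.List.length_slice]
    constructor
    · intro hcontra; omega
    · intro hcontra; omega

-- L8: characterization of port A
theorem pv_A_char (s : String) (k : Int) :
    distinctPoints s k
      = PySem.Set.len (PySem.Set.ofList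
          (((List.range s.toList.length).filter
              (fun i : Nat => decide (0 ≤ k ∧ (i : Int) + k ≤ (s.toList.length : Int)))).map
            (pvKey s.toList k.toNat))) := by
  by_cases hk : 0 ≤ k
  · obtain ⟨K, hkk⟩ : ∃ K : Nat, k = (K : Int) := ⟨k.toNat, (Int.toNat_of_nonneg hk).symm⟩
    subst hkk
    unfold distinctPoints
    simp only [PySem.List.pyRange_zero_natCast, List.foldl_map, PySem.List.pyGetD_natCast,
      PySem.List.pySetD_natCast, Int.toNat_natCast]
    rw [pv_fill s.toList s.toList.length le_rfl]
    rw [show s.toList.length + 1 - s.toList.length = 1 by omega]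
    simp only [List.take_length, List.replicate_one]
    rw [pv_foldl_scan, pv_foldl_scan]
    simp only [List.singleton_append]
    rw [pv_foldl_ite_add]
    simp only [PySem.Set.empty]
    rw [← PySem.Set.ofList_eq_foldl]
    congr 1
    rw [List.filter_congr (fun i hi => pv_cond s.toList (K : Int) i (List.mem_range.mp hi))]
    congr 1
    apply List.map_congr_left
    intro i hif
    obtain ⟨hir, hcond⟩ := List.mem_filter.mp hif
    simp only [decide_eq_true_eq] at hcond
    have hle : i + K ≤ s.toList.length := by omega
    rw [pv_prefix_f pvDx s.toList i K hle, pv_prefix_f pvDy s.toList i K hle]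
    simp [pvKey, pvSumX, pvSumY]
  · unfold distinctPoints
    simp only [PySem.List.pyRange_zero_natCast, List.foldl_map, PySem.List.pyGetD_natCast,
      PySem.List.pySetD_natCast]
    rw [pv_foldl_ite_add]
    have hc : ∀ i ∈ List.range s.toList.length,
        (((PySem.List.slice s.toList (some (i : Int)) (some ((i : Int) + k))).length : Int) == k)
          = false := by
      intro i hi
      rw [pv_cond s.toList k i (List.mem_range.mp hi)]
      simp only [decide_eq_false_iff_not]
      rintro ⟨h1, _⟩
      omega
    have hc' : ∀ i ∈ List.range s.toList.length,
        (decide (0 ≤ k ∧ (i : Int) + k ≤ (s.toList.length : Int))) = false := by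
      intro i hi
      simp only [decide_eq_false_iff_not]
      rintro ⟨h1, _⟩
      omega
    rw [List.filter_congr hc, List.filter_congr hc']
    simp [PySem.Set.ofList, PySem.Set.empty]

-- L9: a nonempty constant key list yields a one-element set
theorem pv_ofList_const {α : Type} [BEq α] [LawfulBEq α] (m : Nat) (hm : 0 < m) (v : α) :
    PySem.Set.ofList ((List.range m).map (fun _ => v)) = [v] := by
  induction m with
  | zero => omega
  | succ m ih =>
      rw [List.range_succ]
      simp only [List.map_append, List.map_cons, List.map_nil]
      rw [pv_ofList_snoc]
      rcases Nat.eq_zero_or_pos m with hm0 | hm0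
      · subst hm0
        simp [PySem.Set.ofList, PySem.Set.empty, PySem.Set.add]
      · rw [ih hm0]
        simp [PySem.Set.add]

-- the filter of A's bound check is an initial segment of range
theorem pv_filter_range (N m : Nat) (h : m ≤ N) :
    (List.range N).filter (fun i => decide (i < m)) = List.range m := by
  induction N with
  | zero =>
      have : m = 0 := by omega
      subst this
      rfl
  | succ N ih =>
      rcases Nat.lt_or_ge N m with hNm | hNm
      · have hm : m = N + 1 := by omega
        subst hm
        exact List.filter_eq_self.mpr (fun a ha => by
          simp only [decide_eq_true_eq]
          exact List.mem_range.mp ha)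
      · rw [List.range_succ, List.filter_append, ih hNm]
        simp [Nat.not_lt.mpr hNm]

-- ===== VERDICT (by name: the statement is the Claim_ definition above) =====
theorem distinctPoints_spec : Claim_equal_distinctPoints := by
  intro s k _
  unfold Spec_distinctPoints
  rw [pv_A_char]
  by_cases hk : 0 ≤ k
  · by_cases hkn : k ≤ (s.toList.length : Int)
    · by_cases hn : s.toList = []
      · unfold distinctPoints_alt
        rw [if_pos (by
          simp only [Bool.or_eq_true, decide_eq_true_eq, beq_iff_eq]
          simp [hn])]
        rw [hn]
        rfl
      · rw [pv_B_char s k hk hkn hn]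
        obtain ⟨K, hkk⟩ : ∃ K : Nat, k = (K : Int) := ⟨k.toNat, (Int.toNat_of_nonneg hk).symm⟩
        subst hkk
        have hKN : K ≤ s.toList.length := by exact_mod_cast hkn
        have hN : 0 < s.toList.length := List.length_pos_of_ne_nil hn
        simp only [Int.toNat_natCast]
        rcases Nat.eq_zero_or_pos K with hK0 | hK0
        · subst hK0
          simp only [Nat.cast_zero, add_zero, Nat.sub_zero]
          have hfA : (List.filter (fun i : Nat => decide ((0 : Int) ≤ 0 ∧ (i : Int) ≤ (s.toList.length : Int)))
                (List.range s.toList.length)) = List.range s.toList.length :=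
            List.filter_eq_self.mpr (fun i hi => by
              simp only [decide_eq_true_eq]
              have := List.mem_range.mp hi
              omega)
          rw [hfA]
          rw [List.map_congr_left (l := List.range s.toList.length)
                (f := pvKey s.toList 0) (g := fun _ => pvKey s.toList 0 0)
                (fun i _ => by simp [pvKey]),
              List.map_congr_left (l := List.range (s.toList.length + 1))
                (f := pvKey s.toList 0) (g := fun _ => pvKey s.toList 0 0)
                (fun i _ => by simp [pvKey]),
              pv_ofList_const _ hN, pv_ofList_const _ (by omega)]
        · have hfilter : ((List.range s.toList.length).filter
              (fun i : Nat => decide (0 ≤ (K : Int) ∧ (i : Int) + (K : Int) ≤ (s.toList.length : Int))))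
              = List.range (s.toList.length - K + 1) := by
            rw [List.filter_congr (fun i hi => by
              show decide (0 ≤ (K : Int) ∧ (i : Int) + (K : Int) ≤ (s.toList.length : Int))
                  = decide (i < s.toList.length - K + 1)
              rw [decide_eq_decide]
              omega)]
            exact pv_filter_range _ _ (by omega)
          rw [hfilter]
    · unfold distinctPoints_alt
      rw [if_pos (by
        simp only [Bool.or_eq_true, decide_eq_true_eq, beq_iff_eq]
        omega)]
      rw [List.filter_congr (fun (i : Nat) (hi : i ∈ List.range s.toList.length) => by
        show decide (0 ≤ k ∧ (i : Int) + k ≤ (s.toList.length : Int)) = false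
        simp only [decide_eq_false_iff_not]
        rintro ⟨_, h2⟩
        omega)]
      simp [PySem.Set.ofList, PySem.Set.empty, PySem.Set.len]
  · unfold distinctPoints_alt
    rw [if_pos (by
      simp only [Bool.or_eq_true, decide_eq_true_eq, beq_iff_eq]
      omega)]
    rw [List.filter_congr (fun (i : Nat) (hi : i ∈ List.range s.toList.length) => by
      show decide (0 ≤ k ∧ (i : Int) + k ≤ (s.toList.length : Int)) = false
      simp only [decide_eq_false_iff_not]
      rintro ⟨h1, _⟩
      omega)]
    simp [PySem.Set.ofList, PySem.Set.empty, PySem.Set.len]
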